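-- pv_equiv track=rewrite | github.com/john-db/temp_exact | phylo2vec.py | joiners
-- ===== SOURCE A (Python) =====
-- def joiners(v):
--     i = len(v) - 1
--     if len(v) == 2:
--         return [1]
--     if v[i] < i:
--         return [i] + joiners(v[:-1])
--     else:
--         waits = v[i] - i + 1
--         temp = joiners(v[:-1])
--         return (temp[0 : waits] + [i] + temp[waits:])
-- ===== SOURCE B (Python) =====
-- def joiners(v):
--     res = [1]
--     for i in range(2, len(v)):
--         pos = 0 if v[i] < i else v[i] - i + 1
--         res.insert(pos, i)
--     return res
-- ===== Notes on version B (the rewrite author's own statement) =====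
-- stated objective: faster
-- what changed: Replaces A's top-down recursion (which copies v[:-1] and two result slices at every level) with a single bottom-up loop that rank-inserts each label into one result list in place.
import Mathlib
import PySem

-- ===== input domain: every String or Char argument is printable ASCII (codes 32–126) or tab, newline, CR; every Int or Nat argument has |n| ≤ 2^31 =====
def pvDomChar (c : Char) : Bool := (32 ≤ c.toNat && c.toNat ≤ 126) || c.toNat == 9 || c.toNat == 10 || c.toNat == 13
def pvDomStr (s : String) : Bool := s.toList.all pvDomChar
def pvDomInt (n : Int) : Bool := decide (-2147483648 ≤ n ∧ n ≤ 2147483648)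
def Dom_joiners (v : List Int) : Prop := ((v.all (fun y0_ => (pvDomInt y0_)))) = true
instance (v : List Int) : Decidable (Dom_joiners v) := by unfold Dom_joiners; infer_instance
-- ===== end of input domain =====

-- B replaces A's top-down recursion with O(n)-deep list slicing by a single bottom-up
-- loop that rank-inserts each label in place (objective: faster by constant factor).

-- ===== PORT A =====
def joiners (v : List Int) : List Int :=
  let i : Int := (v.length : Int) - 1
  if v.length = 2 then [1]
  else
    match hx : PySem.List.pyGet? v i with
    | none => []   -- v[i] raises IndexError here (only for len(v) < 2); excluded by Pre_
    | some x =>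
      if x < i then
        i :: joiners (PySem.List.slice v none (some (-1)))
      else
        let waits := x - i + 1
        let temp := joiners (PySem.List.slice v none (some (-1)))
        PySem.List.slice temp (some 0) (some waits) ++ [i] ++
          PySem.List.slice temp (some waits) none
termination_by v.length
decreasing_by
  all_goals
    rw [PySem.List.slice_to_neg_one]
    rcases v with _ | ⟨a, vs⟩
    · simp [PySem.List.pyGet?, PySem.List.pyIdx?] at hx
    · simp

-- ===== PORT B =====
def joiners_alt (v : List Int) : List Int :=
  (PySem.List.pyRange 2 (v.length : Int) 1).foldl
    (fun res i =>
      let x := PySem.List.pyGetD v i 0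
      PySem.List.insert res (if x < i then 0 else x - i + 1) i)
    [1]

-- ===== PRECONDITION & SPEC =====
-- Pre_: A raises (IndexError reached through the recursion) on every list of length < 2.
def Pre_joiners (v : List Int) : Prop := 2 ≤ v.length
instance (v : List Int) : Decidable (Pre_joiners v) := by unfold Pre_joiners; infer_instance
def pvWitness_joiners : List Int := ([0, 0])

def Spec_joiners (v : List Int) (out : List Int) : Prop := out = joiners_alt v
instance (v : List Int) (out : List Int) : Decidable (Spec_joiners v out) := by unfold Spec_joiners; infer_instance

-- ===== CLAIM (what is proved, stated in full; the proofs are below) =====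
def Claim_equal_joiners : Prop := ∀ (v : List Int), Dom_joiners v → Pre_joiners v → Spec_joiners v (joiners v)

-- ===== LEMMAS AND PROOFS =====

-- PySem.List.insert for a nonnegative position, with Python's clamping past the end.
lemma insert_of_nonneg {α : Type} (xs : List α) (p : Int) (a : α) (hp : 0 ≤ p) :
    PySem.List.insert xs p a = xs.take p.toNat ++ a :: xs.drop p.toNat := by
  simp only [PySem.List.insert, PySem.List.sliceIndices,
    if_neg (by omega : ¬ (1 : Int) < 0), if_neg (not_lt.mpr hp)]
  rcases le_total p.toNat xs.length with hle | hle
  · have : (min p (xs.length : Int)).toNat = p.toNat := by omega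
    rw [this]
  · have h1 : (min p (xs.length : Int)).toNat = xs.length := by omega
    rw [h1, List.take_of_length_le hle, List.take_of_length_le (le_refl _),
      List.drop_of_length_le hle, List.drop_of_length_le (le_refl _)]

-- One unfolding of A, phrased as B's loop body applied to A on the shorter list.
lemma joiners_step (v : List Int) (h : 3 ≤ v.length) :
    joiners v =
      (fun res (i : Int) =>
        let x := PySem.List.pyGetD v i 0
        PySem.List.insert res (if x < i then 0 else x - i + 1) i)
        (joiners v.dropLast) ((v.length : Int) - 1) := by
  have hne : v.length ≠ 2 := by omega
  have hcast : (v.length : Int) - 1 = ((v.length - 1 : Nat) : Int) := by omega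
  have hidx : v.length - 1 < v.length := by omega
  have hget : PySem.List.pyGet? v ((v.length : Int) - 1) = some v[v.length - 1] := by
    rw [hcast, PySem.List.pyGet?_natCast, List.getElem?_eq_getElem hidx]
  have hgetD : PySem.List.pyGetD v ((v.length : Int) - 1) 0 = v[v.length - 1] := by
    rw [hcast, PySem.List.pyGetD_natCast, List.getD_eq_getElem?_getD,
      List.getElem?_eq_getElem hidx]
    rfl
  rw [joiners]
  simp only [hne, if_false, PySem.List.slice_to_neg_one, hgetD]
  split
  next heq => rw [hget] at heq; cases heq
  next x heq =>
    rw [hget] at heq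
    obtain rfl : x = v[v.length - 1] := (Option.some.inj heq).symm
    by_cases hlt : v[v.length - 1] < (v.length : Int) - 1
    · simp only [hlt, if_true, PySem.List.insert_zero]
    · have hw : (0 : Int) ≤ v[v.length - 1] - ((v.length : Int) - 1) + 1 := by omega
      simp only [hlt, if_false]
      rw [PySem.List.slice_zero_start, PySem.List.slice_to _ hw, PySem.List.slice_from _ hw,
        insert_of_nonneg _ _ _ hw, List.append_assoc, List.singleton_append]

-- B's loop body reads v only at indices < len(v) - 1 below the top step,
-- so the fold over the range 2 .. len(v)-1 may read v.dropLast instead.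
lemma body_dropLast (v : List Int) (i : Int) (h2 : 0 ≤ i) (h3 : i < (v.length : Int) - 1) :
    PySem.List.pyGetD v i 0 = PySem.List.pyGetD v.dropLast i 0 := by
  have hcast : i = ((i.toNat : Nat) : Int) := by omega
  have hi : i.toNat < v.dropLast.length := by
    rw [List.length_dropLast]; omega
  rw [hcast, PySem.List.pyGetD_natCast, PySem.List.pyGetD_natCast,
    List.getD_eq_getElem?_getD, List.getD_eq_getElem?_getD,
    List.getElem?_eq_getElem hi, List.getElem?_eq_getElem (by omega : i.toNat < v.length),
    List.getElem_dropLast]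

lemma joiners_eq_alt : ∀ (n : Nat) (v : List Int), v.length = n → 2 ≤ n →
    joiners v = joiners_alt v := by
  intro n
  induction n using Nat.strong_induction_on with
  | _ n ih =>
    intro v hlen h2
    by_cases hbase : n = 2
    · subst hbase
      rw [joiners]
      simp only [hlen]
      unfold joiners_alt
      rw [hlen, PySem.List.pyRange_one_eq_nil (by norm_num)]
      rfl
    · have h3 : 3 ≤ n := by omega
      obtain ⟨m, rfl⟩ : ∃ m, n = m + 1 := ⟨n - 1, by omega⟩
      have hdl : v.dropLast.length = m := by simp [hlen]
      have hIH : joiners v.dropLast = joiners_alt v.dropLast :=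
        ih m (by omega) v.dropLast hdl (by omega)
      have hone : (v.length : Int) - 1 = (m : Int) := by omega
      have hlen' : (v.length : Int) = (m : Int) + 1 := by omega
      rw [joiners_step v (by omega), hone, hIH]
      unfold joiners_alt
      simp only [hdl]
      rw [hlen', PySem.List.pyRange_one_succ_right (by omega), List.foldl_append]
      simp only [List.foldl_cons, List.foldl_nil]
      congr 1
      exact PySem.List.foldl_congr_mem _ _ _ _ (by
        intro acc x hx
        rw [PySem.List.mem_pyRange_one] at hx
        have hb := body_dropLast v x (by omega) (by omega)
        simp only [hb])

-- ===== VERDICT (by name: the statement is the Claim_ definition above) =====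
theorem joiners_spec : Claim_equal_joiners := by
  intro v _ hpre
  unfold Spec_joiners
  exact (joiners_eq_alt v.length v rfl hpre).symm ▸ rfl
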